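-- pv_equiv track=rewrite | github.com/cryptograss/maybelle-config | delivery-kid/scripts/backfill-album-tracks.py | canonical_track_cid
-- ===== SOURCE A (Python) =====
-- def canonical_track_cid(track: dict) -> tuple[str, str]:
--     """Pick the canonical CID + source-format for a track.
--
--     FLAC is preferred (lossless, archival source). Falls back to OGG,
--     then alphabetically-first encoding. Returns (cid, format_key).
--     """
--     encodings = track.get("encodings", {})
--     for fmt in ("flac", "ogg", "wav", "m4a", "mp3"):
--         if fmt in encodings and encodings[fmt].get("cid"):
--             return encodings[fmt]["cid"], fmt
--     # last-resort: any encoding with a cid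
--     for fmt, enc in sorted(encodings.items()):
--         if enc.get("cid"):
--             return enc["cid"], fmt
--     raise ValueError(f"track has no encoding with a cid: {track}")
-- ===== SOURCE B (Python) =====
-- _RANK = {"flac": 0, "ogg": 1, "wav": 2, "m4a": 3, "mp3": 4}
--
--
-- def canonical_track_cid(track: dict) -> tuple[str, str]:
--     """Pick the canonical CID + source-format for a track.
--
--     Single pass over the encodings, keeping the candidate with the
--     smallest priority key (preferred-format rank, then format name).
--     No ordered scans, no sorting.
--     """
--     encodings = track.get("encodings", {})
--     best = None
--     for fmt, enc in encodings.items():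
--         cid = enc.get("cid")
--         if cid:
--             key = (_RANK.get(fmt, 5), fmt)
--             if best is None or key < best[0]:
--                 best = (key, cid, fmt)
--     if best is None:
--         raise ValueError(f"track has no encoding with a cid: {track}")
--     return best[1], best[2]
-- ===== Notes on version B (the rewrite author's own statement) =====
-- stated objective: alternative
-- what changed: Replaces A's staged ordered scans (preferred-tuple loop, then a sorted-items fallback loop) with a single unordered pass over the encodings that keeps the candidate minimizing a numeric-priority key (rank, fmt); no sorting and no preference scan remain.
import Mathlib
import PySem

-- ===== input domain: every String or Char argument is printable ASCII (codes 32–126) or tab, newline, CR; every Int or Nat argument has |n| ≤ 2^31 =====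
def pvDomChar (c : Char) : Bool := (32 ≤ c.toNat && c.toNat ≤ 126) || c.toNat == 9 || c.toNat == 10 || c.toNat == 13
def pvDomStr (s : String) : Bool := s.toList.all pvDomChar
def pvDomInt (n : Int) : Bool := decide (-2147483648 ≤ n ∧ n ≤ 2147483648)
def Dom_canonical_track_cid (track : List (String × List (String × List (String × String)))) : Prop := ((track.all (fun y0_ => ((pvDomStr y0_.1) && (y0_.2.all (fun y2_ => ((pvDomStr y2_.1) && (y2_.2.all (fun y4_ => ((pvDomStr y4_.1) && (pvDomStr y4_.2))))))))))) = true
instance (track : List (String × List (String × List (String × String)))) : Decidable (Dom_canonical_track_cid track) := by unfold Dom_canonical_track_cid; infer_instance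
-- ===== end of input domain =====

-- B replaces A's staged ordered scans (preferred tuple, then sorted fallback) by a
-- single unordered pass keeping the candidate with the smallest (rank, fmt) key
-- (objective: alternative algorithm; no sorting, no preference scan).

-- ===== PORT A =====
-- enc.get("cid") truthy test: key missing or empty string are both falsy
def pvCid (enc : List (String × String)) : String :=
  (PySem.Dict.ofList enc).getD "cid" ""

-- A's first loop: for fmt in ("flac",...): if fmt in encodings and encodings[fmt].get("cid")
def pvLoop1 (encodings : PySem.Dict String (List (String × String))) :
    List String → Option (String × String)
  | [] => none
  | fmt :: rest =>
    if encodings.contains fmt ∧ pvCid (encodings.getD fmt []) ≠ "" then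
      some (pvCid (encodings.getD fmt []), fmt)
    else pvLoop1 encodings rest

-- A's second loop: for fmt, enc in sorted(encodings.items()): if enc.get("cid")
def pvLoop2 : List (String × List (String × String)) → Option (String × String)
  | [] => none
  | (fmt, enc) :: rest =>
    if pvCid enc ≠ "" then some (pvCid enc, fmt) else pvLoop2 rest

-- encodings = track.get("encodings", {}) as a dict (shared first line of A and B)
def pvEncodings (track : List (String × List (String × List (String × String)))) : PySem.Dict String (List (String × String)) :=
  PySem.Dict.ofList ((PySem.Dict.ofList track).getD "encodings" [])

def canonical_track_cid (track : List (String × List (String × List (String × String)))) : String × String :=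
  match pvLoop1 (pvEncodings track) ["flac", "ogg", "wav", "m4a", "mp3"] with
  | some r => r
  | none =>
    -- items have unique keys, so Python's tuple sort orders by the key
    match pvLoop2 (PySem.List.sorted (pvEncodings track).items (fun p => p.1) false) with
    | some r => r
    | none => ("", "")   -- Python raises ValueError here; excluded by Pre_

-- ===== PORT B =====
-- module constant _RANK = {"flac": 0, "ogg": 1, "wav": 2, "m4a": 3, "mp3": 4}
def pvRankDict : PySem.Dict String Int :=
  PySem.Dict.ofList [("flac", 0), ("ogg", 1), ("wav", 2), ("m4a", 3), ("mp3", 4)]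

-- Python tuple '<' on (int, str) is lexicographic; ported explicitly (exact on ASCII strings)
def pvKeyLt (a b : Int × String) : Bool := a.1 < b.1 || (a.1 == b.1 && a.2 < b.2)

-- B's loop body: if cid: key = (_RANK.get(fmt,5), fmt); if best is None or key < best[0]: best = (key, cid, fmt)
def pvStep (best : Option ((Int × String) × String × String))
    (item : String × List (String × String)) : Option ((Int × String) × String × String) :=
  let cid := (PySem.Dict.ofList item.2).getD "cid" ""
  if cid ≠ "" then
    let key := (pvRankDict.getD item.1 5, item.1)
    match best with
    | none => some (key, cid, item.1)
    | some b => if pvKeyLt key b.1 then some (key, cid, item.1) else some b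
  else best

def canonical_track_cid_alt (track : List (String × List (String × List (String × String)))) : String × String :=
  match (pvEncodings track).items.foldl pvStep none with
  | some b => (b.2.1, b.2.2)
  | none => ("", "")   -- raise ValueError; excluded by Pre_

-- ===== PRECONDITION & SPEC =====
-- Pre_ excludes exactly the tracks with no encoding carrying a non-empty "cid",
-- on which the Python A (and B) raise ValueError.
def Pre_canonical_track_cid (track : List (String × List (String × List (String × String)))) : Prop :=
  ((pvEncodings track).items.any
    (fun p => (PySem.Dict.ofList p.2).getD "cid" "" ≠ "")) = true
instance (track : List (String × List (String × List (String × String)))) : Decidable (Pre_canonical_track_cid track) := by unfold Pre_canonical_track_cid; infer_instance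

def pvWitness_canonical_track_cid : (List (String × List (String × List (String × String)))) :=
  [("encodings", [("mp3", [("cid", "QmABC")])])]

def Spec_canonical_track_cid (track : List (String × List (String × List (String × String)))) (out : String × String) : Prop := out = canonical_track_cid_alt track
instance (track : List (String × List (String × List (String × String)))) (out : String × String) : Decidable (Spec_canonical_track_cid track out) := by unfold Spec_canonical_track_cid; infer_instance

-- ===== CLAIM (what is proved, stated in full; the proofs are below) =====
def Claim_equal_canonical_track_cid : Prop := ∀ (track : List (String × List (String × List (String × String)))), Dom_canonical_track_cid track → Pre_canonical_track_cid track → Spec_canonical_track_cid track (canonical_track_cid track)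

-- ===== LEMMAS AND PROOFS =====

-- proof-side fused form of A: one scan of a format-name list for the first truthy cid
def pvLoopB (encodings : PySem.Dict String (List (String × String))) :
    List String → Option (String × String)
  | [] => none
  | fmt :: rest =>
    let cid := (PySem.Dict.ofList (encodings.getD fmt [])).getD "cid" ""
    if cid ≠ "" then some (cid, fmt) else pvLoopB encodings rest

-- B's step specialised to a key (what pvStep does on the item (k, e.getD k []))
def pvStepK (e : PySem.Dict String (List (String × String)))
    (best : Option ((Int × String) × String × String)) (k : String) :
    Option ((Int × String) × String × String) :=
  pvStep best (k, e.getD k [])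

-- the priority key and its strict order on format names
def pvKey (k : String) : Int × String := (pvRankDict.getD k 5, k)
def Klt (a b : String) : Prop := pvKeyLt (pvKey a) (pvKey b) = true

theorem keyLt_asymm {a b : Int × String} (h : pvKeyLt a b = true) : pvKeyLt b a = false := by
  simp only [pvKeyLt, Bool.or_eq_true, Bool.and_eq_true, decide_eq_true_eq, beq_iff_eq] at h ⊢
  simp only [Bool.or_eq_false_iff, Bool.and_eq_false_iff, decide_eq_false_iff_not, beq_eq_false_iff_ne]
  rcases h with h | ⟨h1, h2⟩
  · exact ⟨by omega, Or.inl (by omega)⟩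
  · exact ⟨by omega, Or.inr (lt_asymm h2)⟩

theorem keyLt_total_eq {a b : Int × String} (h1 : pvKeyLt a b = false) (h2 : pvKeyLt b a = false) :
    a = b := by
  simp only [pvKeyLt, Bool.or_eq_false_iff, Bool.and_eq_false_iff, decide_eq_false_iff_not,
    beq_eq_false_iff_ne] at h1 h2
  have he1 : a.1 = b.1 := by omega
  rcases h1.2 with h | h
  · exact absurd he1 h
  · rcases h2.2 with h' | h'
    · exact absurd he1.symm h'
    · exact Prod.ext he1 (le_antisymm (le_of_not_gt h') (le_of_not_gt h))

theorem keyLt_trans {a b c : Int × String} (h1 : pvKeyLt a b = true) (h2 : pvKeyLt b c = true) :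
    pvKeyLt a c = true := by
  simp only [pvKeyLt, Bool.or_eq_true, Bool.and_eq_true, decide_eq_true_eq, beq_iff_eq] at h1 h2 ⊢
  rcases h1 with h1 | ⟨h1, h1'⟩ <;> rcases h2 with h2 | ⟨h2, h2'⟩
  · exact Or.inl (by omega)
  · exact Or.inl (by omega)
  · exact Or.inl (by omega)
  · exact Or.inr ⟨by omega, lt_trans h1' h2'⟩

-- ===== A's fused form (the lemmas of the staged-scan analysis) =====

theorem pvLoop1_eq_loopB_filter (e : PySem.Dict String (List (String × String)))
    (fmts : List String) :
    pvLoop1 e fmts = pvLoopB e (fmts.filter (fun f => e.contains f)) := by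
  induction fmts with
  | nil => rfl
  | cons f rest ih =>
    by_cases hc : e.contains f
    · simp [pvLoop1, pvLoopB, hc, pvCid, ih]
    · simp [pvLoop1, hc, ih]

theorem pvLoop2_map_eq_loopB (e : PySem.Dict String (List (String × String)))
    (ks : List String) :
    pvLoop2 (ks.map (fun k => (k, e.getD k []))) = pvLoopB e ks := by
  induction ks with
  | nil => rfl
  | cons k rest ih => simp [pvLoop2, pvLoopB, pvCid, ih]

theorem pvLoopB_append (e : PySem.Dict String (List (String × String)))
    (l1 l2 : List String) :
    pvLoopB e (l1 ++ l2) =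
      match pvLoopB e l1 with
      | some r => some r
      | none => pvLoopB e l2 := by
  induction l1 with
  | nil => rfl
  | cons f rest ih =>
    by_cases h : (PySem.Dict.ofList (e.getD f [])).getD "cid" "" ≠ ""
    · simp [pvLoopB, h]
    · simp [pvLoopB, h, ih]

theorem sorted_items_eq_map_sorted_keys (e : PySem.Dict String (List (String × String)))
    (hnd : e.keys.Nodup) :
    PySem.List.sorted e.items (fun p => p.1) false =
      (PySem.List.sorted e.keys (fun k => k) false).map (fun k => (k, e.getD k [])) := by
  apply PySem.List.sorted_eq_of_perm_of_pairwise_lt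
  · have hperm : (PySem.List.sorted e.keys (fun k => k) false).Perm e.keys :=
      PySem.List.sorted_perm _ _ _
    rw [PySem.Dict.items_eq_map_keys e hnd []]
    exact hperm.map _
  · have hle : (PySem.List.sorted e.keys (fun k => k) false).Pairwise (· ≤ ·) :=
      PySem.List.sorted_pairwise _ _
    have hnd : (PySem.List.sorted e.keys (fun k => k) false).Nodup :=
      ((PySem.List.sorted_perm e.keys (fun k => k) false).nodup_iff).mpr hnd
    have hlt : (PySem.List.sorted e.keys (fun k => k) false).Pairwise (· < ·) :=
      (hle.and hnd).imp (fun h => lt_of_le_of_ne h.1 h.2)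
    simpa [List.pairwise_map] using hlt

-- all format names a none-returning scan visited have falsy cids
theorem falsy_of_loopB_none (e : PySem.Dict String (List (String × String)))
    (l : List String) (h : pvLoopB e l = none) :
    ∀ g ∈ l, (PySem.Dict.ofList (e.getD g [])).getD "cid" "" = "" := by
  induction l with
  | nil => simp
  | cons f rest ih =>
    intro g hg
    by_cases hf : (PySem.Dict.ofList (e.getD f [])).getD "cid" "" ≠ ""
    · simp [pvLoopB, hf] at h
    · rcases List.mem_cons.mp hg with hg | hg
      · subst hg; simpa using hf
      · exact ih (by simpa [pvLoopB, hf] using h) g hg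

-- dropping only falsy names does not change the first truthy hit
theorem pvLoopB_filter (e : PySem.Dict String (List (String × String)))
    (l : List String) (p : String → Bool)
    (h : ∀ g ∈ l, p g = false → (PySem.Dict.ofList (e.getD g [])).getD "cid" "" = "") :
    pvLoopB e (l.filter p) = pvLoopB e l := by
  induction l with
  | nil => rfl
  | cons f rest ih =>
    have hrest := fun g hg => h g (List.mem_cons_of_mem _ hg)
    by_cases hp : p f = true
    · by_cases hf : (PySem.Dict.ofList (e.getD f [])).getD "cid" "" ≠ ""
      · simp [pvLoopB, hp, hf]
      · simp [pvLoopB, hp, hf, ih hrest]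
    · have hf : (PySem.Dict.ofList (e.getD f [])).getD "cid" "" = "" :=
        h f (List.mem_cons_self) (by simpa using hp)
      simp [List.filter_cons, hp, pvLoopB, hf, ih hrest]

-- ===== the rank function's concrete values =====

theorem pvRank_eq_five_of_not_mem (k : String)
    (h : k ∉ (["flac", "ogg", "wav", "m4a", "mp3"] : List String)) :
    pvRankDict.getD k 5 = 5 := by
  simp only [List.mem_cons, not_or] at h
  obtain ⟨h1, h2, h3, h4, h5, -⟩ := h
  have hmk : pvRankDict = PySem.Dict.mk [("flac", 0), ("ogg", 1), ("wav", 2), ("m4a", 3), ("mp3", 4)] := by decide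
  rw [hmk]
  simp [PySem.Dict.getD, PySem.Dict.get?_mk_cons, PySem.Dict.get?,
    Ne.symm h1, Ne.symm h2, Ne.symm h3, Ne.symm h4, Ne.symm h5]

theorem pvRank_lt_five_of_mem (k : String)
    (h : k ∈ (["flac", "ogg", "wav", "m4a", "mp3"] : List String)) :
    pvRankDict.getD k 5 < 5 := by
  fin_cases h <;> decide

-- ===== B's fold: order-independence and behaviour on a Klt-sorted list =====

theorem pvStepK_comm (e : PySem.Dict String (List (String × String)))
    (x y : String) (z : Option ((Int × String) × String × String)) :
    pvStepK e (pvStepK e z x) y = pvStepK e (pvStepK e z y) x := by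
  by_cases hx : (PySem.Dict.ofList (e.getD x [])).getD "cid" "" = ""
  · simp [pvStepK, pvStep, hx]
  · by_cases hy : (PySem.Dict.ofList (e.getD y [])).getD "cid" "" = ""
    · simp [pvStepK, pvStep, hy]
    · -- both truthy: both orders produce the key-minimum of z, x, y
      cases z with
      | none =>
        simp only [pvStepK, pvStep, hx, hy, ne_eq, not_false_eq_true, if_pos]
        by_cases hyx : pvKeyLt (pvRankDict.getD y 5, y) (pvRankDict.getD x 5, x) = true
        · simp [hyx, keyLt_asymm hyx]
        · by_cases hxy : pvKeyLt (pvRankDict.getD x 5, x) (pvRankDict.getD y 5, y) = true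
          · simp [hxy, hyx]
          · have hk : ((pvRankDict.getD x 5 : Int), x) = (pvRankDict.getD y 5, y) :=
              keyLt_total_eq (by simpa using hxy) (by simpa using hyx)
            have : x = y := congrArg Prod.snd hk
            subst this
            simp [hxy, hyx]
      | some b =>
        simp only [pvStepK, pvStep, hx, hy, ne_eq, not_false_eq_true, if_pos]
        by_cases hxb : pvKeyLt (pvRankDict.getD x 5, x) b.1 = true <;>
          by_cases hyb : pvKeyLt (pvRankDict.getD y 5, y) b.1 = true
        · -- both beat b: compare x and y
          by_cases hyx : pvKeyLt (pvRankDict.getD y 5, y) (pvRankDict.getD x 5, x) = true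
          · simp [hxb, hyb, hyx, keyLt_asymm hyx]
          · by_cases hxy : pvKeyLt (pvRankDict.getD x 5, x) (pvRankDict.getD y 5, y) = true
            · simp [hxb, hyb, hxy, hyx]
            · have hk : ((pvRankDict.getD x 5 : Int), x) = (pvRankDict.getD y 5, y) :=
                keyLt_total_eq (by simpa using hxy) (by simpa using hyx)
              have : x = y := congrArg Prod.snd hk
              subst this
              simp [hxb, hxy, hyx]
        · -- only x beats b; y cannot beat x either
          have hyx : pvKeyLt (pvRankDict.getD y 5, y) (pvRankDict.getD x 5, x) = false := by
            by_contra h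
            have := keyLt_trans (a := (pvRankDict.getD y 5, y)) (by simpa using h) hxb
            simp [hyb] at this
          simp [hxb, hyb, hyx]
        · -- only y beats b; x cannot beat y
          have hxy : pvKeyLt (pvRankDict.getD x 5, x) (pvRankDict.getD y 5, y) = false := by
            by_contra h
            have := keyLt_trans (a := (pvRankDict.getD x 5, x)) (by simpa using h) hyb
            simp [hxb] at this
          simp [hxb, hyb, hxy]
        · simp [hxb, hyb]

-- a candidate no later name's key beats survives the rest of the fold
theorem foldl_stepK_keep (e : PySem.Dict String (List (String × String)))
    (l : List String) (kb : Int × String) (c f : String)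
    (h : ∀ g ∈ l, pvKeyLt (pvKey g) kb = false) :
    l.foldl (pvStepK e) (some (kb, c, f)) = some (kb, c, f) := by
  induction l with
  | nil => rfl
  | cons g rest ih =>
    have hg := h g List.mem_cons_self
    have hrest := fun g' hg' => h g' (List.mem_cons_of_mem _ hg')
    by_cases hgc : (PySem.Dict.ofList (e.getD g [])).getD "cid" "" = ""
    · simpa [List.foldl_cons, pvStepK, pvStep, hgc] using ih hrest
    · have hg' : pvKeyLt (pvRankDict.getD g 5, g) kb = false := by simpa [pvKey] using hg
      simpa [List.foldl_cons, pvStepK, pvStep, hgc, hg'] using ih hrest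

-- on a strictly Klt-sorted name list the argmin fold is the first-truthy scan
theorem foldl_stepK_sorted (e : PySem.Dict String (List (String × String)))
    (L : List String) (h : L.Pairwise Klt) :
    L.foldl (pvStepK e) none =
      (pvLoopB e L).map (fun r => (pvKey r.2, r.1, r.2)) := by
  induction L with
  | nil => rfl
  | cons f rest ih =>
    rw [List.pairwise_cons] at h
    by_cases hf : (PySem.Dict.ofList (e.getD f [])).getD "cid" "" = ""
    · simpa [List.foldl_cons, pvStepK, pvStep, hf, pvLoopB] using ih h.2
    · have hkeep : ∀ g ∈ rest, pvKeyLt (pvKey g) (pvRankDict.getD f 5, f) = false :=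
        fun g hg => by simpa [pvKey] using keyLt_asymm (h.1 g hg)
      simp only [List.foldl_cons, pvStepK, pvStep, hf, ne_eq, not_false_eq_true, if_pos]
      rw [foldl_stepK_keep e rest (pvRankDict.getD f 5, f)
        ((PySem.Dict.ofList (e.getD f [])).getD "cid" "") f hkeep]
      simp [pvLoopB, hf, pvKey]

-- ===== the priority ordering: fp ++ (sorted keys minus fp) is Klt-sorted and a permutation of the keys =====

theorem pref5_pairwise : (["flac", "ogg", "wav", "m4a", "mp3"] : List String).Pairwise Klt := by
  unfold Klt
  decide

theorem fp_pairwise (e : PySem.Dict String (List (String × String))) :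
    ((["flac", "ogg", "wav", "m4a", "mp3"] : List String).filter (fun f => e.contains f)).Pairwise Klt :=
  List.Pairwise.sublist List.filter_sublist pref5_pairwise

-- the fallback keys that survive the dedup filter are non-preferred (rank 5)
theorem rank5_of_mem_filtered (e : PySem.Dict String (List (String × String))) (k : String)
    (hk : k ∈ (PySem.List.sorted e.keys (fun k => k) false).filter
      (fun k => !((["flac", "ogg", "wav", "m4a", "mp3"] : List String).filter (fun f => e.contains f)).contains k)) :
    pvRankDict.getD k 5 = 5 := by
  rcases List.mem_filter.mp hk with ⟨hks, hnc⟩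
  by_contra hne
  have hmem5 : k ∈ (["flac", "ogg", "wav", "m4a", "mp3"] : List String) := by
    by_contra hnot; exact hne (pvRank_eq_five_of_not_mem k hnot)
  have hkeys : k ∈ e.keys := (PySem.List.mem_sorted _ _ _ _).mp hks
  have hcont : e.contains k = true := (PySem.Dict.contains_iff_mem_keys _ _).mpr hkeys
  have hfp : k ∈ (["flac", "ogg", "wav", "m4a", "mp3"] : List String).filter (fun f => e.contains f) :=
    List.mem_filter.mpr ⟨hmem5, hcont⟩
  simp [hfp] at hnc

-- the full priority ordering is strictly Klt-sorted
theorem Lp_pairwise (e : PySem.Dict String (List (String × String))) (hnd : e.keys.Nodup) :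
    ((["flac", "ogg", "wav", "m4a", "mp3"] : List String).filter (fun f => e.contains f) ++
      (PySem.List.sorted e.keys (fun k => k) false).filter
        (fun k => !((["flac", "ogg", "wav", "m4a", "mp3"] : List String).filter (fun f => e.contains f)).contains k)).Pairwise Klt := by
  rw [List.pairwise_append]
  refine ⟨fp_pairwise e, ?_, ?_⟩
  · have hle : (PySem.List.sorted e.keys (fun k => k) false).Pairwise (· ≤ ·) :=
      PySem.List.sorted_pairwise _ _
    have hnds : (PySem.List.sorted e.keys (fun k => k) false).Nodup :=
      ((PySem.List.sorted_perm e.keys (fun k => k) false).nodup_iff).mpr hnd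
    have hlt : (PySem.List.sorted e.keys (fun k => k) false).Pairwise (· < ·) :=
      (hle.and hnds).imp (fun h => lt_of_le_of_ne h.1 h.2)
    have hflt : ((PySem.List.sorted e.keys (fun k => k) false).filter
        (fun k => !((["flac", "ogg", "wav", "m4a", "mp3"] : List String).filter (fun f => e.contains f)).contains k)).Pairwise (· < ·) :=
      List.Pairwise.sublist List.filter_sublist hlt
    refine hflt.imp_of_mem ?_
    intro a b ha hb hab
    have hra := rank5_of_mem_filtered e a ha
    have hrb := rank5_of_mem_filtered e b hb
    unfold Klt pvKey pvKeyLt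
    simp [hra, hrb, hab]
  · intro a ha b hb
    have h5 : a ∈ (["flac", "ogg", "wav", "m4a", "mp3"] : List String) := (List.mem_filter.mp ha).1
    have hra : pvRankDict.getD a 5 < 5 := pvRank_lt_five_of_mem a h5
    have hrb := rank5_of_mem_filtered e b hb
    unfold Klt pvKey pvKeyLt
    simp only [Bool.or_eq_true, decide_eq_true_eq]
    left; omega

-- the priority ordering is a rearrangement of the keys
theorem Lp_perm (e : PySem.Dict String (List (String × String))) (hnd : e.keys.Nodup) :
    e.keys.Perm
      ((["flac", "ogg", "wav", "m4a", "mp3"] : List String).filter (fun f => e.contains f) ++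
        (PySem.List.sorted e.keys (fun k => k) false).filter
          (fun k => !((["flac", "ogg", "wav", "m4a", "mp3"] : List String).filter (fun f => e.contains f)).contains k)) := by
  have hnds : (PySem.List.sorted e.keys (fun k => k) false).Nodup :=
    ((PySem.List.sorted_perm e.keys (fun k => k) false).nodup_iff).mpr hnd
  have hndLp : ((["flac", "ogg", "wav", "m4a", "mp3"] : List String).filter (fun f => e.contains f) ++
      (PySem.List.sorted e.keys (fun k => k) false).filter
        (fun k => !((["flac", "ogg", "wav", "m4a", "mp3"] : List String).filter (fun f => e.contains f)).contains k)).Nodup := by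
    refine List.Nodup.append (List.Nodup.filter _ (by decide)) (List.Nodup.filter _ hnds) ?_
    intro a ha hb
    rcases List.mem_filter.mp hb with ⟨-, hnc⟩
    simp [ha] at hnc
  refine (List.perm_ext_iff_of_nodup hnd hndLp).mpr ?_
  intro a
  constructor
  · intro hk
    by_cases hfp : a ∈ (["flac", "ogg", "wav", "m4a", "mp3"] : List String).filter (fun f => e.contains f)
    · exact List.mem_append.mpr (Or.inl hfp)
    · refine List.mem_append.mpr (Or.inr (List.mem_filter.mpr ⟨(PySem.List.mem_sorted _ _ _ _).mpr hk, ?_⟩))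
      simp [hfp]
  · intro hk
    rcases List.mem_append.mp hk with hfp | hfl
    · have hc : e.contains a = true := (List.mem_filter.mp hfp).2
      exact (PySem.Dict.contains_iff_mem_keys _ _).mp hc
    · exact (PySem.List.mem_sorted _ _ _ _).mp (List.mem_filter.mp hfl).1

-- ===== VERDICT (by name: the statement is the Claim_ definition above) =====
theorem canonical_track_cid_spec : Claim_equal_canonical_track_cid := by
  intro track _ _
  unfold Spec_canonical_track_cid canonical_track_cid canonical_track_cid_alt
  have hnd : (pvEncodings track).keys.Nodup := PySem.Dict.nodup_keys_ofList _
  -- A's two loops are the first-truthy scans of the preferred names and the sorted keys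
  rw [pvLoop1_eq_loopB_filter, sorted_items_eq_map_sorted_keys (pvEncodings track) hnd,
    pvLoop2_map_eq_loopB]
  -- B's fold over the items is the fold over the keys
  rw [PySem.Dict.items_eq_map_keys (pvEncodings track) hnd [], List.foldl_map]
  have hstep : (fun (acc : Option ((Int × String) × String × String)) (k : String) =>
      pvStep acc (k, (pvEncodings track).getD k [])) = pvStepK (pvEncodings track) := rfl
  rw [hstep]
  -- reorder B's fold along the priority ordering
  rw [(Lp_perm (pvEncodings track) hnd).foldl_eq'
    (fun x _ y _ z => pvStepK_comm (pvEncodings track) x y z) none]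
  -- on that Klt-sorted list the fold is the first-truthy scan
  rw [foldl_stepK_sorted (pvEncodings track) _ (Lp_pairwise (pvEncodings track) hnd)]
  -- fuse A's two scans and drop the duplicated (falsy) preferred names
  have hfuse : pvLoopB (pvEncodings track)
      ((["flac", "ogg", "wav", "m4a", "mp3"] : List String).filter (fun f => (pvEncodings track).contains f) ++
        (PySem.List.sorted (pvEncodings track).keys (fun k => k) false).filter
          (fun k => !((["flac", "ogg", "wav", "m4a", "mp3"] : List String).filter (fun f => (pvEncodings track).contains f)).contains k)) =
      match pvLoopB (pvEncodings track)
          ((["flac", "ogg", "wav", "m4a", "mp3"] : List String).filter (fun f => (pvEncodings track).contains f)) with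
      | some r => some r
      | none => pvLoopB (pvEncodings track) (PySem.List.sorted (pvEncodings track).keys (fun k => k) false) := by
    rw [pvLoopB_append]
    cases hfp : pvLoopB (pvEncodings track)
        ((["flac", "ogg", "wav", "m4a", "mp3"] : List String).filter (fun f => (pvEncodings track).contains f)) with
    | some r => rfl
    | none =>
      refine pvLoopB_filter (pvEncodings track) _ _ ?_
      intro g hg hpg
      have hgfp : g ∈ (["flac", "ogg", "wav", "m4a", "mp3"] : List String).filter
          (fun f => (pvEncodings track).contains f) := by
        have h1 : (List.filter (fun f => (pvEncodings track).contains f)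
            ["flac", "ogg", "wav", "m4a", "mp3"]).contains g = true := by
          cases h : (List.filter (fun f => (pvEncodings track).contains f)
              ["flac", "ogg", "wav", "m4a", "mp3"]).contains g
          · rw [h] at hpg; simp at hpg
          · rfl
        exact List.contains_iff_mem.mp h1
      exact falsy_of_loopB_none (pvEncodings track) _ hfp g hgfp
  rw [hfuse]
  cases pvLoopB (pvEncodings track)
      ((["flac", "ogg", "wav", "m4a", "mp3"] : List String).filter (fun f => (pvEncodings track).contains f)) <;>
    cases pvLoopB (pvEncodings track) (PySem.List.sorted (pvEncodings track).keys (fun k => k) false) <;> rfl
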